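-- pv_equiv track=rewrite | github.com/johnddouglass/transient-snap | validate.py | match_notes
-- ===== SOURCE A (Python) =====
-- def match_notes(orig_pos, ref_pos, window):
--     used, pairs = set(), []
--     for op in sorted(orig_pos):
--         best_i, best_d = None, window + 1
--         for i, rp in enumerate(ref_pos):
--             if i in used: continue
--             d = abs(op - rp)
--             if d < best_d: best_d, best_i = d, i
--         if best_i is not None and best_d <= window:
--             pairs.append((op, ref_pos[best_i])); used.add(best_i)
--     return pairs
-- ===== SOURCE B (Python) =====
-- def match_notes(orig_pos, ref_pos, window):
--     remaining = list(enumerate(ref_pos))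
--     pairs = []
--     for op in sorted(orig_pos):
--         best = min(remaining, key=lambda t: (abs(op - t[1]), t[0]), default=None)
--         if best is not None and abs(op - best[1]) <= window:
--             pairs.append((op, best[1]))
--             remaining.remove(best)
--     return pairs
-- ===== Notes on version B (the rewrite author's own statement) =====
-- stated objective: alternative
-- what changed: B drops A's used-index set and repeated skip-scan over the full ref_pos: it keeps one shrinking list of (index, value) candidates, picks the match with a single min by the key (abs(op-rp), index), and removes the matched pair from the list.
import Mathlib
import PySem

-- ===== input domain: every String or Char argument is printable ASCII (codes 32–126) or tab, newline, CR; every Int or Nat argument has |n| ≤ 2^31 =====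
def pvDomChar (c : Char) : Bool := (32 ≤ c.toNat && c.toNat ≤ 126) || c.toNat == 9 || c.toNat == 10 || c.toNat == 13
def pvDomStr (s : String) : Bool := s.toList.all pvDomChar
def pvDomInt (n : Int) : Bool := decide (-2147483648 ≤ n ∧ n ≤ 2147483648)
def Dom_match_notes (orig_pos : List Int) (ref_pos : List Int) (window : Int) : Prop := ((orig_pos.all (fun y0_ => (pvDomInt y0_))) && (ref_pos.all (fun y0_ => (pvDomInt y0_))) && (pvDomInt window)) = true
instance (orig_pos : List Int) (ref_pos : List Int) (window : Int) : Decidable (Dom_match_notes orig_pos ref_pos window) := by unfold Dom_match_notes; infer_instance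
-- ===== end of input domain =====

-- B replaces A's used-index set and full rescan of ref_pos by a shrinking candidate
-- list with a single min-by-(distance, index) selection and removal of the matched
-- element (objective: alternative decomposition, same worst-case cost).

-- ===== PORT A =====
-- one iteration of A's outer loop: inner scan over enumerate(ref_pos) skipping used
-- indices, tracking (best_i, best_d) from (None, window+1); ref_pos[best_i] is always
-- in range (best_i comes from enumerate), so pyGetD's default 0 is never used.
def pvAStep (ref_pos : List Int) (window : Int)
    (st : PySem.Set Int × List (Int × Int)) (op : Int) : PySem.Set Int × List (Int × Int) :=
  let best := (PySem.List.enumerate ref_pos 0).foldl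
    (fun (b : Option Int × Int) t =>
      if PySem.Set.contains st.1 t.1 then b
      else if |op - t.2| < b.2 then (some t.1, |op - t.2|) else b)
    (none, window + 1)
  match best.1 with
  | some i => if best.2 ≤ window then (PySem.Set.add st.1 i, st.2 ++ [(op, PySem.List.pyGetD ref_pos i 0)]) else st
  | none => st

def match_notes (orig_pos : List Int) (ref_pos : List Int) (window : Int) : List (Int × Int) :=
  ((PySem.List.sorted orig_pos (fun x => x) false).foldl (pvAStep ref_pos window)
    (PySem.Set.empty, [])).2

-- ===== PORT B =====
-- one iteration of B's loop: min(remaining, key=lambda t: (abs(op-t[1]), t[0]),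
-- default=None), then remove the matched pair (remove? never misses: best ∈ remaining).
def pvBStep (window : Int)
    (st : List (Int × Int) × List (Int × Int)) (op : Int) : List (Int × Int) × List (Int × Int) :=
  match PySem.List.min2? st.1 (fun t => |op - t.2|) (fun t => t.1) with
  | none => st
  | some best =>
    if |op - best.2| ≤ window then
      ((PySem.List.remove? st.1 best).getD st.1, st.2 ++ [(op, best.2)])
    else st

def match_notes_alt (orig_pos : List Int) (ref_pos : List Int) (window : Int) : List (Int × Int) :=
  ((PySem.List.sorted orig_pos (fun x => x) false).foldl (pvBStep window)
    (PySem.List.enumerate ref_pos 0, [])).2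

-- ===== PRECONDITION & SPEC =====
def Spec_match_notes (orig_pos : List Int) (ref_pos : List Int) (window : Int) (out : List (Int × Int)) : Prop := out = match_notes_alt orig_pos ref_pos window
instance (orig_pos : List Int) (ref_pos : List Int) (window : Int) (out : List (Int × Int)) : Decidable (Spec_match_notes orig_pos ref_pos window out) := by unfold Spec_match_notes; infer_instance

-- ===== CLAIM (what is proved, stated in full; the proofs are below) =====
def Claim_equal_match_notes : Prop := ∀ (orig_pos : List Int) (ref_pos : List Int) (window : Int), Dom_match_notes orig_pos ref_pos window → Spec_match_notes orig_pos ref_pos window (match_notes orig_pos ref_pos window)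

-- ===== LEMMAS AND PROOFS =====

-- A's inner scan, as a fold with a general accumulator
def pvScanA (op _w : Int) (b : Option Int × Int) (L : List (Int × Int)) : Option Int × Int :=
  L.foldl (fun b t => if |op - t.2| < b.2 then (some t.1, |op - t.2|) else b) b

-- min2?'s fold (B's selection), with a general accumulator, as structural recursion
def pvBSel (op : Int) : Option (Int × Int) → (Int × Int) → Option (Int × Int)
  | none, t => some t
  | some m, t =>
    if (decide (|op - t.2| < |op - m.2|) || (!decide (|op - m.2| < |op - t.2|) && decide (t.1 < m.1))) then some t else some m

def pvScanB (op : Int) (s : Option (Int × Int)) : List (Int × Int) → Option (Int × Int)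
  | [] => s
  | t :: L => pvScanB op (pvBSel op s t) L

lemma min2?_eq_pvScanB (op : Int) (L : List (Int × Int)) :
    PySem.List.min2? L (fun t => |op - t.2|) (fun t => t.1) = pvScanB op none L := by
  show List.foldl _ none L = _
  generalize (none : Option (Int × Int)) = s
  induction L generalizing s with
  | nil => rfl
  | cons t L ih =>
    rw [List.foldl_cons, pvScanB, ← ih (pvBSel op s t)]
    congr 1
    cases s <;> rfl

-- the coupling between A's (best_i, best_d) accumulator and B's running minimum
def pvRel (w op : Int) (sB : Option (Int × Int)) (sA : Option Int × Int) : Prop :=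
  match sB with
  | none => sA = (none, w + 1)
  | some c => sA = if |op - c.2| ≤ w then (some c.1, |op - c.2|) else (none, w + 1)

lemma scan_rel (w op : Int) :
    ∀ (L : List (Int × Int)), L.Pairwise (fun a b => a.1 < b.1) →
    ∀ (sB : Option (Int × Int)) (sA : Option Int × Int),
      (∀ c, sB = some c → ∀ u ∈ L, c.1 < u.1) → pvRel w op sB sA →
      pvRel w op (pvScanB op sB L) (pvScanA op w sA L) := by
  intro L
  induction L with
  | nil => intro _ sB sA _ h; exact h
  | cons t L ih =>
    intro hp sB sA hidx hrel
    rcases List.pairwise_cons.mp hp with ⟨ht, hpL⟩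
    rw [pvScanB]
    simp only [pvScanA, List.foldl_cons]
    cases sB with
    | none =>
      simp only [pvRel] at hrel; subst hrel
      simp only [pvBSel]
      apply ih hpL
      · intro c hc u hu
        simp only [Option.some.injEq] at hc; subst hc; exact ht u hu
      · simp only [pvRel]
        split_ifs with h1 h2 <;> first | rfl | omega
    | some c =>
      have hct : c.1 < t.1 := hidx c rfl t (by simp)
      simp only [pvRel] at hrel; subst hrel
      simp only [pvBSel]
      have hcond : (decide (|op - t.2| < |op - c.2|) || (!decide (|op - c.2| < |op - t.2|) && decide (t.1 < c.1)))
          = decide (|op - t.2| < |op - c.2|) := by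
        have h1 : ¬ t.1 < c.1 := by omega
        simp [h1]
      simp only [hcond]
      by_cases hlt : |op - t.2| < |op - c.2|
      · simp only [hlt, decide_true, if_true]
        apply ih hpL
        · intro c' hc'; simp only [Option.some.injEq] at hc'; subst hc'; exact ht
        · simp only [pvRel]
          split_ifs <;> first | rfl | omega
      · simp only [hlt, decide_false, Bool.false_eq_true, if_false]
        apply ih hpL
        · intro c' hc' u hu
          have hcc : c' = c := by simpa using hc'.symm
          subst hcc
          exact hidx c' rfl u (List.mem_cons_of_mem _ hu)
        · simp only [pvRel]
          by_cases hdc : |op - c.2| ≤ w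
          · simp [hdc, hlt]
          · have hlt' : ¬ |op - t.2| < w + 1 := by omega
            simp [hdc, hlt']

lemma pvScanB_mem (op : Int) :
    ∀ (L : List (Int × Int)) (s : Option (Int × Int)) (c : Int × Int),
      pvScanB op s L = some c → c ∈ L ∨ s = some c := by
  intro L
  induction L with
  | nil => intro s c h; exact Or.inr h
  | cons t L ih =>
    intro s c h
    rw [pvScanB] at h
    rcases ih _ _ h with h' | h'
    · exact Or.inl (List.mem_cons_of_mem _ h')
    · cases s with
      | none =>
        simp only [pvBSel, Option.some.injEq] at h'; subst h'; exact Or.inl List.mem_cons_self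
      | some m =>
        simp only [pvBSel] at h'
        by_cases hc : (decide (|op - t.2| < |op - m.2|) || (!decide (|op - m.2| < |op - t.2|) && decide (t.1 < m.1))) = true
        · rw [if_pos hc] at h'
          simp only [Option.some.injEq] at h'; subst h'; exact Or.inl List.mem_cons_self
        · rw [if_neg hc] at h'
          exact Or.inr h'

-- each (i, v) produced by enumerate(xs) satisfies i = k and xs[k] = v
lemma mem_enumerate_spec {α : Type} :
    ∀ (xs : List α) (s : Int) (t : Int × α), t ∈ PySem.List.enumerate xs s →
      ∃ k : Nat, t.1 = s + k ∧ xs[k]? = some t.2 := by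
  intro xs
  induction xs with
  | nil => intro s t h; simp [PySem.List.enumerate] at h
  | cons x xs ih =>
    intro s t h
    rw [PySem.List.enumerate_cons] at h
    rcases List.mem_cons.mp h with h | h
    · subst h; exact ⟨0, by simp, by simp⟩
    · rcases ih (s + 1) t h with ⟨k, h1, h2⟩
      refine ⟨k + 1, by push_cast; omega, ?_⟩
      simpa using h2

lemma enumerate_pairwise (xs : List Int) (s : Int) :
    (PySem.List.enumerate xs s).Pairwise (fun a b => a.1 < b.1) := by
  have h := PySem.List.map_fst_enumerate xs s
  have hp : ((PySem.List.enumerate xs s).map (fun x => x.1)).Pairwise (fun a b => a < b) := by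
    rw [h]; exact PySem.List.pairwise_lt_pyRange_one _ _
  exact List.pairwise_map.mp hp

-- A's skip-the-used inner loop is the plain scan over the filtered candidate list
lemma skip_eq_filter (used : PySem.Set Int) (op w : Int) (E : List (Int × Int)) :
    E.foldl (fun (b : Option Int × Int) t =>
        if PySem.Set.contains used t.1 then b
        else if |op - t.2| < b.2 then (some t.1, |op - t.2|) else b) (none, w + 1)
    = pvScanA op w (none, w + 1) (E.filter (fun t => !PySem.Set.contains used t.1)) := by
  rw [pvScanA, List.foldl_filter]
  congr 1
  funext b t
  cases h : PySem.Set.contains used t.1 <;> simp [h]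

lemma contains_add (s : PySem.Set Int) (i x : Int) :
    PySem.Set.contains (PySem.Set.add s i) x = (PySem.Set.contains s x || x == i) := by
  unfold PySem.Set.add PySem.Set.contains
  by_cases hxi : x = i
  · subst hxi
    cases h : List.contains s x <;>
      simp_all [List.contains_append, List.contains_iff_mem]
  · have hbe : (x == i) = false := by simp [hxi]
    cases h : List.contains s i <;>
      simp [List.contains_append, hbe, hxi]

-- removing the (unique, by strictly increasing fst) matched pair = filtering its index out
lemma filter_ne_eq_remove :
    ∀ (L : List (Int × Int)), L.Pairwise (fun a b => a.1 < b.1) → ∀ c ∈ L,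
      L.filter (fun t => !(t.1 == c.1)) = (PySem.List.remove? L c).getD L := by
  intro L
  induction L with
  | nil => intro _ c hc; simp at hc
  | cons a L ih =>
    intro hp c hc
    rcases List.pairwise_cons.mp hp with ⟨ha, hpL⟩
    rcases List.mem_cons.mp hc with rfl | hcL
    · have hall : ∀ t ∈ L, (!(t.1 == c.1)) = true := by
        intro t ht; have := ha t ht; simp; omega
      simp only [PySem.List.remove?, List.idxOf?_cons, BEq.rfl, if_true, Option.map_some,
        List.eraseIdx_cons_zero, Option.getD_some]
      simp [List.filter_cons, List.filter_eq_self.mpr hall]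
    · have hac : a.1 < c.1 := ha c hcL
      have hane : (a == c) = false := by
        apply beq_eq_false_iff_ne.mpr
        intro h; rw [h] at hac; omega
      obtain ⟨k, hk⟩ := Option.isSome_iff_exists.mp (List.isSome_idxOf?.mpr hcL)
      have hfa : (!(a.1 == c.1)) = true := by simp; omega
      calc (a :: L).filter (fun t => !(t.1 == c.1))
          = a :: L.filter (fun t => !(t.1 == c.1)) := by simp [List.filter_cons, hfa]
        _ = a :: (PySem.List.remove? L c).getD L := by rw [ih hpL c hcL]
        _ = (PySem.List.remove? (a :: L) c).getD (a :: L) := by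
            simp [PySem.List.remove?, List.idxOf?_cons, hane, hk]

-- main invariant: after any prefix of the sorted originals, B's remaining list is
-- exactly enumerate(ref_pos) with A's used indices filtered out, and the outputs agree
lemma outer (ref_pos : List Int) (w : Int) :
    ∀ (l : List Int) (used : PySem.Set Int) (pairs : List (Int × Int)),
      ((l.foldl (pvAStep ref_pos w) (used, pairs)).2)
      = ((l.foldl (pvBStep w)
           ((PySem.List.enumerate ref_pos 0).filter (fun t => !PySem.Set.contains used t.1), pairs)).2) := by
  intro l
  induction l with
  | nil => intro used pairs; rfl
  | cons op l ih =>
    intro used pairs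
    simp only [List.foldl_cons]
    have hpR : ((PySem.List.enumerate ref_pos 0).filter (fun t => !PySem.Set.contains used t.1)).Pairwise
        (fun a b => a.1 < b.1) := (enumerate_pairwise ref_pos 0).filter _
    have hrel := scan_rel w op _ hpR none (none, w + 1) (by intro c hc; cases hc) rfl
    have hAbest : (PySem.List.enumerate ref_pos 0).foldl
        (fun (b : Option Int × Int) t => if PySem.Set.contains used t.1 then b
          else if |op - t.2| < b.2 then (some t.1, |op - t.2|) else b) (none, w + 1)
        = pvScanA op w (none, w + 1)
            ((PySem.List.enumerate ref_pos 0).filter (fun t => !PySem.Set.contains used t.1)) :=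
      skip_eq_filter used op w _
    cases hB : pvScanB op none ((PySem.List.enumerate ref_pos 0).filter (fun t => !PySem.Set.contains used t.1)) with
    | none =>
      rw [hB] at hrel
      have hA : pvScanA op w (none, w + 1)
          ((PySem.List.enumerate ref_pos 0).filter (fun t => !PySem.Set.contains used t.1)) = (none, w + 1) := hrel
      have hstepA : pvAStep ref_pos w (used, pairs) op = (used, pairs) := by
        simp only [pvAStep]
        rw [hAbest, hA]
      have hstepB : pvBStep w
          ((PySem.List.enumerate ref_pos 0).filter (fun t => !PySem.Set.contains used t.1), pairs) op
          = ((PySem.List.enumerate ref_pos 0).filter (fun t => !PySem.Set.contains used t.1), pairs) := by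
        simp only [pvBStep]
        rw [min2?_eq_pvScanB, hB]
      rw [hstepA, hstepB]
      exact ih used pairs
    | some c =>
      rw [hB] at hrel
      have hA : pvScanA op w (none, w + 1)
          ((PySem.List.enumerate ref_pos 0).filter (fun t => !PySem.Set.contains used t.1))
          = if |op - c.2| ≤ w then (some c.1, |op - c.2|) else (none, w + 1) := hrel
      have hcR : c ∈ (PySem.List.enumerate ref_pos 0).filter (fun t => !PySem.Set.contains used t.1) := by
        rcases pvScanB_mem op _ none c hB with h | h
        · exact h
        · cases h
      have hcE : c ∈ PySem.List.enumerate ref_pos 0 := (List.mem_filter.mp hcR).1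
      obtain ⟨k, hk1, hk2⟩ := mem_enumerate_spec ref_pos 0 c hcE
      have hget : PySem.List.pyGetD ref_pos c.1 0 = c.2 := by
        rw [show c.1 = ((k : Nat) : Int) by omega, PySem.List.pyGetD_natCast]
        simp [List.getD_eq_getElem?_getD, hk2]
      have hfilter : (PySem.List.enumerate ref_pos 0).filter
            (fun t => !PySem.Set.contains (PySem.Set.add used c.1) t.1)
          = (PySem.List.remove?
              ((PySem.List.enumerate ref_pos 0).filter (fun t => !PySem.Set.contains used t.1)) c).getD
              ((PySem.List.enumerate ref_pos 0).filter (fun t => !PySem.Set.contains used t.1)) := by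
        rw [← filter_ne_eq_remove _ hpR c hcR, List.filter_filter]
        congr 1
        funext t
        rw [contains_add]
        cases h1 : PySem.Set.contains used t.1 <;> cases h2 : (t.1 == c.1) <;> simp [h1, h2]
      by_cases hdc : |op - c.2| ≤ w
      · have hstepA : pvAStep ref_pos w (used, pairs) op
            = (PySem.Set.add used c.1, pairs ++ [(op, c.2)]) := by
          simp only [pvAStep]
          rw [hAbest, hA, if_pos hdc]
          simp [hdc, hget]
        have hstepB : pvBStep w
            ((PySem.List.enumerate ref_pos 0).filter (fun t => !PySem.Set.contains used t.1), pairs) op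
            = ((PySem.List.remove?
                ((PySem.List.enumerate ref_pos 0).filter (fun t => !PySem.Set.contains used t.1)) c).getD
                ((PySem.List.enumerate ref_pos 0).filter (fun t => !PySem.Set.contains used t.1)),
               pairs ++ [(op, c.2)]) := by
          simp only [pvBStep]
          rw [min2?_eq_pvScanB, hB]
          simp [hdc]
        rw [hstepA, hstepB, ← hfilter]
        exact ih (PySem.Set.add used c.1) (pairs ++ [(op, c.2)])
      · have hstepA : pvAStep ref_pos w (used, pairs) op = (used, pairs) := by
          simp only [pvAStep]
          rw [hAbest, hA, if_neg hdc]
        have hstepB : pvBStep w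
            ((PySem.List.enumerate ref_pos 0).filter (fun t => !PySem.Set.contains used t.1), pairs) op
            = ((PySem.List.enumerate ref_pos 0).filter (fun t => !PySem.Set.contains used t.1), pairs) := by
          simp only [pvBStep]
          rw [min2?_eq_pvScanB, hB]
          simp [hdc]
        rw [hstepA, hstepB]
        exact ih used pairs

-- ===== VERDICT (by name: the statement is the Claim_ definition above) =====
theorem match_notes_spec : Claim_equal_match_notes := by
  intro orig_pos ref_pos window _
  unfold Spec_match_notes match_notes match_notes_alt
  have h := outer ref_pos window (PySem.List.sorted orig_pos (fun x => x) false) PySem.Set.empty []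
  rw [h]
  congr 2
  simp [PySem.Set.empty, PySem.Set.contains]
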